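-- pv_equiv track=rewrite | github.com/Zeroto521/my-data-toolkit | script/make_repl.py | handle_source
-- ===== SOURCE A (Python) =====
-- from itertools import groupby
--
-- IN = ">>> "
--
-- IN2 = "... "
--
-- EMPTYLINE = "\n"
--
-- def handle_source(source: dict) -> str:
--     res = []
--     for is_key, group in groupby(source, lambda x: x != EMPTYLINE):
--         if is_key:
--             for i, block in enumerate(group):
--                 if (
--                     i == 0
--                     or block.startswith("import")
--                     or (block.startswith("from") and "import" in block)
--                 ):
--                     res.append(IN + block)
--                 else:
--                     res.append(IN2 + block)
--
--     return "".join(res) + "\n"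
-- ===== SOURCE B (Python) =====
-- def handle_source(source: dict) -> str:
--     lines = list(source)
--     return "".join(
--         (">>> " if prev == "\n" or line.startswith("import")
--          or (line.startswith("from") and "import" in line) else "... ") + line
--         for prev, line in zip(["\n"] + lines, lines)
--         if line != "\n"
--     ) + "\n"
-- ===== Notes on version B (the rewrite author's own statement) =====
-- stated objective: alternative
-- what changed: Replaces groupby run-splitting with inner enumerate state by a stateless comprehension over the list zipped with a shifted copy of itself: each kept line's prefix is decided locally from its immediate predecessor (block start iff predecessor is a blank line), with no running state or grouping.
import Mathlib
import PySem

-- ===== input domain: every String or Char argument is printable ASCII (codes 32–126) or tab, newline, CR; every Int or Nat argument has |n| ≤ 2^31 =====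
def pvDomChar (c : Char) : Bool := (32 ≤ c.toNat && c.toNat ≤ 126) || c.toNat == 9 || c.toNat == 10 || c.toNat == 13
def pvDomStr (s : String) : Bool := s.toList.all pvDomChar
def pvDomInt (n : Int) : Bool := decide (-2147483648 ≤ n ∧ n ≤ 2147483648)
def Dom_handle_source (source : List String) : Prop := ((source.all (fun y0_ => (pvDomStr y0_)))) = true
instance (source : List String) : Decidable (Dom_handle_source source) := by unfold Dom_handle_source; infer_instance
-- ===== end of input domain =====

-- B drops the groupby/enumerate stateful grouping for a stateless pass over the
-- list zipped with a shifted copy: each line's prefix is decided from its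
-- immediate predecessor alone (alternative decomposition, same cost).

-- ===== PORT A =====
-- the groupby key:  x != "\n"
def pvKey (x : String) : Bool := x != "\n"

-- itertools.groupby source (lambda x: x != "\n"): maximal runs of equal key, in order
def pvGroups (source : List String) : List (Bool × List String) :=
  match source with
  | [] => []
  | x :: xs =>
      (pvKey x, x :: xs.takeWhile (fun y => pvKey y == pvKey x)) ::
        pvGroups (xs.dropWhile (fun y => pvKey y == pvKey x))
termination_by source.length
decreasing_by
  simp only [List.length_cons]
  exact Nat.lt_succ_of_le (List.length_dropWhile_le _ _)

-- "import"-line test shared by both versions' conditions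
def pvIsImport (block : String) : Bool :=
  PySem.Str.startswith block "import" ||
    (PySem.Str.startswith block "from" && PySem.Str.isIn "import" block)

-- the inner 'for i, block in enumerate(group)' loop
def pvEnumLoop (group : List String) (i : Nat) : List String :=
  match group with
  | [] => []
  | block :: rest =>
      (if i == 0 || pvIsImport block then ">>> " ++ block else "... " ++ block) ::
        pvEnumLoop rest (i + 1)

def handle_source (source : List String) : String :=
  let res := (pvGroups source).flatMap (fun g => if g.1 then pvEnumLoop g.2 0 else [])
  PySem.Str.join "" res ++ "\n"

-- ===== PORT B =====
-- the per-pair prefix decision of Source B's comprehension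
def pvPrefix (prev line : String) : String :=
  (if prev == "\n" || pvIsImport line then ">>> " else "... ") ++ line

def handle_source_alt (source : List String) : String :=
  PySem.Str.join ""
    (((("\n" :: source).zip source).filter (fun p => p.2 != "\n")).map
      (fun p => pvPrefix p.1 p.2)) ++ "\n"

-- ===== PRECONDITION & SPEC =====
def Spec_handle_source (source : List String) (out : String) : Prop := out = handle_source_alt source
instance (source : List String) (out : String) : Decidable (Spec_handle_source source out) := by unfold Spec_handle_source; infer_instance

-- ===== CLAIM (what is proved, stated in full; the proofs are below) =====
def Claim_equal_handle_source : Prop := ∀ (source : List String), Dom_handle_source source → Spec_handle_source source (handle_source source)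

-- ===== LEMMAS AND PROOFS =====

-- recursive form of B's filtered/mapped zip; 'prev' carries the predecessor line
def pvZ (prev : String) : List String → List String
  | [] => []
  | x :: xs => if x == "\n" then pvZ x xs else pvPrefix prev x :: pvZ x xs

lemma zip_eq_pvZ (prev : String) (xs : List String) :
    (((prev :: xs).zip xs).filter (fun p => p.2 != "\n")).map (fun p => pvPrefix p.1 p.2)
      = pvZ prev xs := by
  induction xs generalizing prev with
  | nil => rfl
  | cons x xs ih =>
      by_cases h : x = "\n"
      · simpa [List.zip, List.zipWith, pvZ, h] using ih x
      · simpa [List.zip, List.zipWith, pvZ, h] using ih x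

-- pvZ from a "\n" predecessor ignores a leading run of "\n" lines
lemma pvZ_dropWhile (xs : List String) :
    pvZ "\n" (xs.dropWhile (fun y => y == "\n")) = pvZ "\n" xs := by
  induction xs with
  | nil => rfl
  | cons x xs ih =>
      by_cases h : x = "\n"
      · subst h; simpa [pvZ] using ih
      · have hb : (x == "\n") = false := by simp [h]
        simp [List.dropWhile, hb, pvZ]

-- from i ≥ 1 on, the enumerate loop ignores the index
lemma enumLoop_pos (t : List String) (i : Nat) (hi : i ≠ 0) :
    pvEnumLoop t i = t.map (fun b => if pvIsImport b then ">>> " ++ b else "... " ++ b) := by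
  induction t generalizing i with
  | nil => rfl
  | cons b t ih => simp [pvEnumLoop, hi, ih (i + 1) (Nat.succ_ne_zero i)]

-- when the tail is empty or starts with "\n", the predecessor does not matter
lemma pvZ_shape (q : String) (r : List String)
    (hr : r = [] ∨ ∃ r', r = "\n" :: r') :
    pvZ q r = pvZ "\n" r := by
  rcases hr with h | ⟨r', h⟩ <;> subst h <;> simp [pvZ]

-- over a run of non-"\n" lines after a non-"\n" predecessor, pvZ is a plain map
lemma pvZ_run (t : List String) (r : List String) (p : String)
    (ht : ∀ y ∈ t, y ≠ "\n") (hp : p ≠ "\n")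
    (hr : r = [] ∨ ∃ r', r = "\n" :: r') :
    pvZ p (t ++ r) =
      t.map (fun b => if pvIsImport b then ">>> " ++ b else "... " ++ b) ++ pvZ "\n" r := by
  induction t generalizing p with
  | nil => simpa using pvZ_shape p r hr
  | cons b t ih =>
      have hb : b ≠ "\n" := ht b (List.mem_cons_self ..)
      have hbb : (b == "\n") = false := by simp [hb]
      have hpb : (p == "\n") = false := by simp [hp]
      have ih' := ih b (fun y hy => ht y (List.mem_cons_of_mem _ hy)) hb
      simp [pvZ, hbb, pvPrefix, hpb, ih']
      split <;> rfl

lemma flat_eq_pvZ (source : List String) :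
    (pvGroups source).flatMap (fun g => if g.1 then pvEnumLoop g.2 0 else []) =
      pvZ "\n" source := by
  induction source using pvGroups.induct with
  | case1 => simp [pvGroups]; rfl
  | case2 x xs ih =>
    rw [pvGroups]
    by_cases hx : x = "\n"
    · subst hx
      have hk : pvKey "\n" = false := by decide
      have hpred : (fun y => pvKey y == pvKey "\n") = (fun y : String => y == "\n") := by
        funext y; simp [pvKey, bne]
      rw [hpred] at ih ⊢
      simp only [hk, List.flatMap_cons, Bool.false_eq_true, if_false, List.nil_append]
      rw [ih, pvZ_dropWhile]
      simp [pvZ]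
    · have hk : pvKey x = true := by simp [pvKey, hx]
      set t := xs.takeWhile (fun y => pvKey y == pvKey x) with ht
      set r := xs.dropWhile (fun y => pvKey y == pvKey x) with hrr
      have hxs : xs = t ++ r := (List.takeWhile_append_dropWhile).symm
      have htne : ∀ y ∈ t, y ≠ "\n" := by
        intro y hy
        have := List.mem_takeWhile_imp hy
        simp only [hk, beq_true] at this
        simpa [pvKey] using this
      have hrshape : r = [] ∨ ∃ r', r = "\n" :: r' := by
        match hr : r with
        | [] => exact Or.inl rfl
        | y :: r' =>
          refine Or.inr ⟨r', ?_⟩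
          have h0 := List.head?_dropWhile_not (fun y => pvKey y == pvKey x) xs
          rw [← hrr] at h0
          simp only [List.head?_cons] at h0
          rw [hk] at h0
          have : y = "\n" := by simpa [pvKey, bne] using h0
          rw [this]
      simp only [hk, List.flatMap_cons]
      rw [ih]
      rw [pvEnumLoop, enumLoop_pos t 1 (by decide)]
      conv_rhs => rw [hxs]
      have hxb : (x == "\n") = false := by simp [hx]
      simp only [pvZ, hxb, Bool.false_eq_true, if_false]
      rw [pvZ_run t r x htne hx hrshape]
      simp [pvPrefix]

-- ===== VERDICT (by name: the statement is the Claim_ definition above) =====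
theorem handle_source_spec : Claim_equal_handle_source := by
  intro source _
  unfold Spec_handle_source handle_source handle_source_alt
  rw [flat_eq_pvZ, zip_eq_pvZ]
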